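-- pv_equiv track=rewrite | github.com/DavronDostqobilov/list_search | find08_min_count.py | find_min_count
-- ===== SOURCE A (Python) =====
-- def find_min_count(data):
--     """
--     Given the list of numbers, Find count of minimum numbers in the list
--     args:
--         data: list of numbers
--     returns: count of minimum numbers in the list
--     """
--     i=0
--     mn=data[0]
--     while i<len(data):
--         if mn>data[i]:
--             mn=data[i]
--         i+=1
--     return data.count(mn)
-- ===== SOURCE B (Python) =====
-- def find_min_count(data):
--     mn = data[0]
--     count = 1
--     for x in data[1:]:
--         if x == mn:
--             count += 1
--         elif x < mn:
--             mn = x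
--             count = 1
--     return count
-- ===== Notes on version B (the rewrite author's own statement) =====
-- stated objective: faster
-- what changed: Replaces the two scans (a while-loop to find the minimum, then data.count) with one fused pass that maintains the running minimum together with its occurrence count.
import Mathlib
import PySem

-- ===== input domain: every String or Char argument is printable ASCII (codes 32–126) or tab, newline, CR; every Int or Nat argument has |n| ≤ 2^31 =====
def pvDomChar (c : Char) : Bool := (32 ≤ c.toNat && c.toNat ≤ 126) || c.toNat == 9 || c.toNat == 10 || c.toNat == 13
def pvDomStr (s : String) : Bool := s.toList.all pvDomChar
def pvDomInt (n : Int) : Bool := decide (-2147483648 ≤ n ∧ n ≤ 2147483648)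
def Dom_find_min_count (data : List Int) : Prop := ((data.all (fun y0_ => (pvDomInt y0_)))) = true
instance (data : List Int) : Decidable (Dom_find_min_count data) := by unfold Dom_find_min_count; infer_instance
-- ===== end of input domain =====

-- B fuses A's two scans (min-finding while-loop, then data.count) into one pass keeping (running min, its count).


-- ===== PORT A =====
def find_min_count (data : List Int) : Int :=
  match PySem.List.pyGet? data 0 with
  | none => 0  -- unreachable under Pre_ (data ≠ []); Python raises IndexError
  | some m0 =>
    -- while i < len(data): if mn > data[i]: mn = data[i]
    let mn := data.foldl (fun mn x => if mn > x then x else mn) m0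
    PySem.List.count data mn

-- ===== PORT B =====
def find_min_count_alt (data : List Int) : Int :=
  match data with
  | [] => 0  -- unreachable under Pre_ (data ≠ []); Python raises IndexError
  | h :: rest =>
    -- for x in data[1:]: fused (mn, count) update
    (rest.foldl (fun (p : Int × Int) x =>
        if x = p.1 then (p.1, p.2 + 1)
        else if x < p.1 then (x, 1) else p) (h, 1)).2

-- ===== PRECONDITION & SPEC =====
-- Pre_ excludes only the empty list, on which both Pythons raise IndexError at data[0].
def Pre_find_min_count (data : List Int) : Prop := data ≠ []
instance (data : List Int) : Decidable (Pre_find_min_count data) := by unfold Pre_find_min_count; infer_instance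
def pvWitness_find_min_count : List Int := ([1, 0, 0, 2])

def Spec_find_min_count (data : List Int) (out : Int) : Prop := out = find_min_count_alt data
instance (data : List Int) (out : Int) : Decidable (Spec_find_min_count data out) := by unfold Spec_find_min_count; infer_instance

-- ===== CLAIM (what is proved, stated in full; the proofs are below) =====
def Claim_equal_find_min_count : Prop := ∀ (data : List Int), Dom_find_min_count data → Pre_find_min_count data → Spec_find_min_count data (find_min_count data)

-- ===== LEMMAS AND PROOFS =====

theorem foldl_min_le (t : List Int) (m : Int) :
    t.foldl (fun mn x => if x < mn then x else mn) m ≤ m := by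
  induction t generalizing m with
  | nil => simp
  | cons x t ih =>
    simp only [List.foldl_cons]
    split_ifs with h
    · exact le_trans (ih x) (le_of_lt h)
    · exact ih m

theorem fused_invariant (t : List Int) (m c : Int) :
    t.foldl (fun (p : Int × Int) x =>
        if x = p.1 then (p.1, p.2 + 1)
        else if x < p.1 then (x, 1) else p) (m, c)
      = (t.foldl (fun mn x => if x < mn then x else mn) m,
         (if t.foldl (fun mn x => if x < mn then x else mn) m = m then c else 0)
           + (t.count (t.foldl (fun mn x => if x < mn then x else mn) m) : Int)) := by
  induction t generalizing m c with
  | nil => simp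
  | cons x t ih =>
    simp only [List.foldl_cons, List.count_cons]
    by_cases hx : x = m
    · subst hx
      have e1 : (if x = ((x, c) : Int × Int).1 then (((x, c) : Int × Int).1, ((x, c) : Int × Int).2 + 1)
          else if x < ((x, c) : Int × Int).1 then (x, 1) else (x, c)) = (x, c + 1) := by simp
      have e2 : (if x < x then x else x) = x := by simp
      rw [e1]
      simp only [e2]
      rw [ih]
      have hle := foldl_min_le t x
      by_cases hF : t.foldl (fun mn x => if x < mn then x else mn) x = x <;>
        simp [hF] <;> omega
    · by_cases hlt : x < m
      · have e1 : (if x = ((m, c) : Int × Int).1 then (((m, c) : Int × Int).1, ((m, c) : Int × Int).2 + 1)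
            else if x < ((m, c) : Int × Int).1 then (x, 1) else (m, c)) = (x, 1) := by
          simp [hx, hlt]
        have e2 : (if x < m then x else m) = x := if_pos hlt
        rw [e1]
        simp only [e2]
        rw [ih]
        have hle := foldl_min_le t x
        have hFne : t.foldl (fun mn x => if x < mn then x else mn) x ≠ m := by omega
        by_cases hF : t.foldl (fun mn x => if x < mn then x else mn) x = x <;>
          simp [hF, hFne, hx] <;> omega
      · have e1 : (if x = ((m, c) : Int × Int).1 then (((m, c) : Int × Int).1, ((m, c) : Int × Int).2 + 1)
            else if x < ((m, c) : Int × Int).1 then (x, 1) else (m, c)) = (m, c) := by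
          simp [hx, hlt]
        have e2 : (if x < m then x else m) = m := if_neg hlt
        rw [e1]
        simp only [e2]
        rw [ih]
        have hle := foldl_min_le t m
        have hxF : (x == t.foldl (fun mn x => if x < mn then x else mn) m) = false := by
          simp; omega
        simp [hxF]

-- ===== VERDICT (by name: the statement is the Claim_ definition above) =====
theorem find_min_count_spec : Claim_equal_find_min_count := by
  intro data _ hpre
  match data with
  | [] => exact absurd rfl hpre
  | h :: t =>
    unfold Spec_find_min_count find_min_count find_min_count_alt
    rw [PySem.List.pyGet?_zero_cons]
    simp only [gt_iff_lt, List.foldl_cons, if_neg (lt_irrefl h),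
      PySem.List.count_eq, List.count_cons, fused_invariant]
    have hle := foldl_min_le t h
    by_cases hF : t.foldl (fun mn x => if x < mn then x else mn) h = h <;>
      simp [hF] <;> omega
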